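-- pv_equiv track=rewrite | github.com/BRO3886/wiki | DSA/two pointers/card substrings/main.py | substrings_with_cards
-- ===== SOURCE A (Python) =====
-- from typing import List
--
-- def substrings_with_cards(s: List[str], cards: List[str], n: int, m: int) -> int:
--     ans = 0
--     l, r = 0, 0
--     freq_map = {}
--
--     for card in cards:
--         if freq_map.get(card) is None:
--             freq_map[card] = 1
--         else:
--             freq_map[card] += 1
--
--     copy_map = freq_map.copy()
--
--     while r < n:
--         if s[r] not in copy_map:
--             l = r + 1
--             r += 1
--             copy_map = freq_map.copy()  # reset
--             continue
--
--         copy_map[s[r]] -= 1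
--
--         while l <= r and copy_map.get(s[r]) < 0:
--             copy_map[s[l]] += 1
--             l += 1
--
--         ans += r - l + 1
--         r += 1
--
--     return ans
-- ===== SOURCE B (Python) =====
-- def substrings_with_cards(s, cards, n, m):
--     freq = {}
--     for card in cards:
--         freq[card] = freq.get(card, 0) + 1
--
--     ans = 0
--     low = 0          # leftmost admissible start for substrings ending at r
--     occ = {}         # per card character: occurrence indices since the last reset
--     for r in range(n):
--         c = s[r]
--         if c not in freq:
--             low = r + 1
--             occ = {}
--             continue
--         lst = occ.setdefault(c, [])
--         lst.append(r)
--         if len(lst) > freq[c]: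
--             # the window must start strictly after the occurrence freq[c] places back
--             low = max(low, lst[len(lst) - freq[c] - 1] + 1)
--         ans += r - low + 1
--     return ans
-- ===== Notes on version B (the rewrite author's own statement) =====
-- stated objective: faster
-- what changed: B replaces A's shrinking inner while-loop plus full freq_map.copy() per reset by per-character occurrence-index lists: the window's left boundary is the running max of one position derived from the (freq[c]+1)-th-from-last occurrence of the current character, O(1) work per step.
import Mathlib
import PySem

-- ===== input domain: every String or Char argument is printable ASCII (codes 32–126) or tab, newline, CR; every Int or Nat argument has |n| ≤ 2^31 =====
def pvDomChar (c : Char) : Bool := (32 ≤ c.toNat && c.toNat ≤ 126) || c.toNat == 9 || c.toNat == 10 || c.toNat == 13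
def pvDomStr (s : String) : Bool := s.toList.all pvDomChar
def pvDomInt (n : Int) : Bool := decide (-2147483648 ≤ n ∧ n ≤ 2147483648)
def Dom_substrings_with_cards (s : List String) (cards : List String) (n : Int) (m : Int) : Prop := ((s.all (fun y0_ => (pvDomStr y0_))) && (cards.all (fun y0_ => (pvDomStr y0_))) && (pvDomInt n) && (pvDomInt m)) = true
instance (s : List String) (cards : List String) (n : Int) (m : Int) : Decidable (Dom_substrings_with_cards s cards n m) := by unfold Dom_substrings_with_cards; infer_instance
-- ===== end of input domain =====

-- B drops A's shrinking inner while-loop and per-reset freq_map copy entirely: it keeps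
-- per-character occurrence-index lists and derives the window boundary from the
-- (freq[c]+1)-th-from-last occurrence, a different O(n+m) mechanism.

-- s[i] (only evaluated at in-range indices under Pre_)
def pvSL (s : List String) (i : Int) : String := (PySem.List.pyGet? s i).getD ""

-- ===== PORT A =====
-- inner `while l <= r and copy_map.get(s[r]) < 0` loop; fuel (r+1-l) only makes it total,
-- the guard l ≤ r bounds the loop exactly as in Python
def pvAInner (s : List String) (r : Int) : Nat → Int → PySem.Dict String Int → Int × PySem.Dict String Int
  | 0, l, cm => (l, cm)
  | fuel+1, l, cm =>
    if l ≤ r ∧ cm.getD (pvSL s r) 0 < 0 then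
      pvAInner s r fuel (l + 1) (cm.modify (pvSL s l) 0 (· + 1))
    else (l, cm)

-- outer `while r < n` loop; fuel (n - r) only makes it total
def pvAOuter (s : List String) (freq : PySem.Dict String Int) (n : Int) : Nat → Int → Int → Int → PySem.Dict String Int → Int
  | 0, _, _, ans, _ => ans
  | fuel+1, r, l, ans, cm =>
    if cm.contains (pvSL s r) = false then
      pvAOuter s freq n fuel (r + 1) (r + 1) ans freq
    else
      let cm1 := cm.modify (pvSL s r) 0 (· - 1)
      let p := pvAInner s r (r + 1 - l).toNat l cm1
      pvAOuter s freq n fuel (r + 1) p.1 (ans + (r - p.1 + 1)) p.2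

def substrings_with_cards (s : List String) (cards : List String) (n : Int) (m : Int) : Int :=
  let freq := cards.foldl (fun d card =>
      match d.get? card with
      | none => d.insert card 1
      | some _ => d.modify card 0 (· + 1)) PySem.Dict.empty
  pvAOuter s freq n n.toNat 0 0 0 freq

-- ===== PORT B =====
-- lst[i] (only evaluated at in-range indices)
def pvGI (xs : List Int) (i : Int) : Int := (PySem.List.pyGet? xs i).getD 0

-- body of `for r in range(n)` over state (ans, low, occ)
def pvBStep (s : List String) (freq : PySem.Dict String Int)
    (st : Int × Int × PySem.Dict String (List Int)) (r : Int) :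
    Int × Int × PySem.Dict String (List Int) :=
  let c := pvSL s r
  if freq.contains c = false then (st.1, r + 1, PySem.Dict.empty)
  else
    let lst := st.2.2.getD c [] ++ [r]
    let occ' := st.2.2.insert c lst
    let low' := if freq.getD c 0 < (lst.length : Int) then
        max st.2.1 (pvGI lst ((lst.length : Int) - freq.getD c 0 - 1) + 1)
      else st.2.1
    (st.1 + (r - low' + 1), low', occ')

def substrings_with_cards_alt (s : List String) (cards : List String) (n : Int) (m : Int) : Int :=
  let freq := cards.foldl (fun d card => d.insert card (d.getD card 0 + 1)) PySem.Dict.empty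
  ((PySem.List.pyRange 0 n 1).foldl (pvBStep s freq) (0, 0, PySem.Dict.empty)).1

-- ===== PRECONDITION & SPEC =====
-- A raises IndexError at s[r] as soon as n exceeds len(s); both programs return on every other input.
def Pre_substrings_with_cards (s : List String) (cards : List String) (n : Int) (m : Int) : Prop :=
  n ≤ (s.length : Int)
instance (s : List String) (cards : List String) (n : Int) (m : Int) : Decidable (Pre_substrings_with_cards s cards n m) := by unfold Pre_substrings_with_cards; infer_instance

def pvWitness_substrings_with_cards : List String × List String × Int × Int := (["a", "b", "a"], ["a", "b"], 3, 2)

def Spec_substrings_with_cards (s : List String) (cards : List String) (n : Int) (m : Int) (out : Int) : Prop := out = substrings_with_cards_alt s cards n m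
instance (s : List String) (cards : List String) (n : Int) (m : Int) (out : Int) : Decidable (Spec_substrings_with_cards s cards n m out) := by unfold Spec_substrings_with_cards; infer_instance

-- ===== CLAIM (what is proved, stated in full; the proofs are below) =====
def Claim_equal_substrings_with_cards : Prop := ∀ (s : List String) (cards : List String) (n : Int) (m : Int), Dom_substrings_with_cards s cards n m → Pre_substrings_with_cards s cards n m → Spec_substrings_with_cards s cards n m (substrings_with_cards s cards n m)

-- ===== LEMMAS AND PROOFS =====

-- the current window s[l:r]
def pvWin (s : List String) (l r : Nat) : List String := (s.take r).drop l

-- occurrence indices of c in s on [a, b)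
def pvOcc (s : List String) (c : String) (a b : Nat) : List Nat :=
  (List.range' a (b - a)).filter (fun i => s.getD i "" = c)

-- A's copy_map tracks freq minus the multiplicities of the current window
def pvCmInv (cards : List String) (cm : PySem.Dict String Int) (s : List String) (l r : Nat) : Prop :=
  ∀ x : String, cm.contains x = (PySem.Dict.counter cards).contains x ∧
    cm.getD x 0 = (cards.count x : Int) - ((pvWin s l r).count x : Int)

-- every window element is a card
def pvSub (s : List String) (l r : Nat) (cards : List String) : Prop :=
  ∀ x ∈ pvWin s l r, 0 < cards.count x

-- the left boundary both programs compute at step r (l = boundary entering the step)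
def pvTarget (s : List String) (cards : List String) (g l r : Nat) : Nat :=
  let c := s.getD r ""
  let L := pvOcc s c g (r + 1)
  let f := cards.count c
  if L.length ≤ f then l else max l (L.getD (L.length - f - 1) 0 + 1)

lemma pvSL_eq (s : List String) (l : Nat) (h : l < s.length) : pvSL s (l : Int) = s[l] := by
  simp [pvSL, h]

lemma pvWin_nil (s : List String) (l : Nat) : pvWin s l l = [] := by
  simp [pvWin]

lemma pvWin_length (s : List String) (l r : Nat) (hlr : l ≤ r) (hr : r ≤ s.length) :
    (pvWin s l r).length = r - l := by
  simp [pvWin]; omega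

lemma pvWin_cons (s : List String) (l r : Nat) (hlr : l < r) (h : l < s.length) :
    pvWin s l r = s[l] :: pvWin s (l + 1) r := by
  unfold pvWin
  rw [List.drop_eq_getElem_cons (by simp; omega)]
  simp

lemma pvWin_snoc (s : List String) (l r : Nat) (hlr : l ≤ r) (h : r < s.length) :
    pvWin s l (r + 1) = pvWin s l r ++ [s[r]] := by
  unfold pvWin
  rw [List.take_add_one, List.drop_append_of_le_length (by simp; omega)]
  simp [h]

lemma pvOcc_nil (s : List String) (c : String) (a : Nat) : pvOcc s c a a = [] := by
  simp [pvOcc]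

lemma pvOcc_snoc (s : List String) (c : String) (a b : Nat) (hab : a ≤ b) (hb : b < s.length) :
    pvOcc s c a (b + 1) = pvOcc s c a b ++ (if s[b] = c then [b] else []) := by
  unfold pvOcc
  have h1 : b + 1 - a = (b - a) + 1 := by omega
  rw [h1, List.range'_1_concat, List.filter_append]
  have h2 : a + (b - a) = b := by omega
  rw [h2]
  congr 1
  have h3 : s.getD b "" = s[b] := by
    simp [List.getD_eq_getElem?_getD, List.getElem?_eq_getElem hb]
  by_cases h : s[b] = c <;> simp [List.filter_singleton, List.getElem?_eq_getElem hb, h]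

lemma pvOcc_split (s : List String) (c : String) (a m b : Nat) (h1 : a ≤ m) (h2 : m ≤ b) :
    pvOcc s c a b = pvOcc s c a m ++ pvOcc s c m b := by
  unfold pvOcc
  rw [← List.filter_append]
  congr 1
  have h3 : b - a = (m - a) + (b - m) := by omega
  rw [h3, ← List.range'_append_1]
  have h4 : a + (m - a) = m := by omega
  rw [h4]

lemma mem_pvOcc (s : List String) (c : String) (a b i : Nat) (h : i ∈ pvOcc s c a b) :
    a ≤ i ∧ i < b := by
  unfold pvOcc at h
  have := List.mem_range'.mp (List.mem_of_mem_filter h)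
  obtain ⟨j, hj, rfl⟩ := this
  omega

lemma count_pvOcc (s : List String) (c : String) (a : Nat) :
    ∀ b, a ≤ b → b ≤ s.length → (pvWin s a b).count c = (pvOcc s c a b).length := by
  intro b
  induction b with
  | zero =>
    intro h1 _
    have : a = 0 := by omega
    subst this
    simp [pvWin_nil, pvOcc_nil]
  | succ b ih =>
    intro h1 h2
    by_cases hab : a ≤ b
    · have hb : b < s.length := by omega
      rw [pvWin_snoc s a b hab hb, pvOcc_snoc s c a b hab hb,
        List.count_append, List.length_append, ih hab (by omega)]
      by_cases h : s[b] = c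
      · simp [List.count_cons, h]
      · simp [List.count_cons, h]
    · have : a = b + 1 := by omega
      subst this
      simp [pvWin_nil, pvOcc_nil]

-- count of c in s[a:r+1] ≤ f  ↔  the (f+1)-th-from-last occurrence (within [g, r+1)) is < a
lemma pvCount_le_iff (s : List String) (c : String) (g a r f : Nat)
    (hga : g ≤ a) (har : a ≤ r + 1) (hr : r < s.length)
    (hk : f < (pvOcc s c g (r + 1)).length) :
    ((pvWin s a (r + 1)).count c ≤ f) ↔
      ((pvOcc s c g (r + 1)).getD ((pvOcc s c g (r + 1)).length - f - 1) 0 < a) := by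
  have hsplit : pvOcc s c g (r + 1) = pvOcc s c g a ++ pvOcc s c a (r + 1) :=
    pvOcc_split s c g a (r + 1) hga har
  have hcnt : (pvWin s a (r + 1)).count c = (pvOcc s c a (r + 1)).length :=
    count_pvOcc s c a (r + 1) har (by omega)
  rw [hcnt, hsplit]
  rw [hsplit] at hk
  set L1 := pvOcc s c g a with hL1
  set L2 := pvOcc s c a (r + 1) with hL2
  simp only [List.length_append] at hk ⊢
  constructor
  · intro h
    have hlt1 : L1.length + L2.length - f - 1 < L1.length := by omega
    rw [List.getD_append _ _ _ _ hlt1, List.getD_eq_getElem _ _ hlt1]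
    have hmem : L1[L1.length + L2.length - f - 1] ∈ pvOcc s c g a := by
      rw [← hL1]; exact List.getElem_mem hlt1
    exact (mem_pvOcc s c g a _ hmem).2
  · intro h
    by_contra hc2
    push_neg at hc2
    have hge : L1.length ≤ L1.length + L2.length - f - 1 := by omega
    have hlt2 : L1.length + L2.length - f - 1 - L1.length < L2.length := by omega
    rw [List.getD_append_right _ _ _ _ hge, List.getD_eq_getElem _ _ hlt2] at h
    have hmem : L2[L1.length + L2.length - f - 1 - L1.length] ∈ pvOcc s c a (r + 1) := by
      rw [← hL2]; exact List.getElem_mem hlt2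
    have := (mem_pvOcc s c a (r + 1) _ hmem).1
    omega

lemma pvInner_eq (s cards : List String) (g r : Nat) (hr : r < s.length)
    (hf1 : 0 < cards.count s[r]) :
    ∀ (fuel l : Nat) (cm : PySem.Dict String Int),
      r + 1 - l ≤ fuel → g ≤ l → l ≤ r →
      pvCmInv cards cm s l (r + 1) → pvSub s l (r + 1) cards →
      ∃ (l' : Nat) (cm' : PySem.Dict String Int),
        pvAInner s (r : Int) fuel (l : Int) cm = ((l' : Int), cm') ∧
        l' = pvTarget s cards g l r ∧ g ≤ l' ∧ l' ≤ r ∧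
        pvCmInv cards cm' s l' (r + 1) ∧ pvSub s l' (r + 1) cards := by
  intro fuel
  induction fuel with
  | zero => intro l cm hfuel _ hlr _ _; omega
  | succ fuel ih =>
    intro l cm hfuel hgl hlr hinv hsub
    have hsl : pvSL s (r : Int) = s[r] := pvSL_eq s r hr
    have hgd : s.getD r "" = s[r] := by
      simp [List.getD_eq_getElem?_getD, List.getElem?_eq_getElem hr]
    have hcm := (hinv s[r]).2
    by_cases hcase : (pvWin s l (r + 1)).count s[r] ≤ cards.count s[r]
    · -- loop exits immediately; target = l
      refine ⟨l, cm, ?_, ?_, hgl, hlr, hinv, hsub⟩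
      · simp only [pvAInner]
        rw [if_neg]
        rintro ⟨-, hneg⟩
        rw [hsl, hcm] at hneg
        omega
      · simp only [pvTarget]
        rw [hgd]
        by_cases hL : (pvOcc s s[r] g (r + 1)).length ≤ cards.count s[r]
        · rw [if_pos hL]
        · push_neg at hL
          rw [if_neg (by omega)]
          have := (pvCount_le_iff s s[r] g l r (cards.count s[r]) hgl (by omega) hr hL).mp hcase
          omega
    · -- one more shrink step
      push_neg at hcase
      have hk : cards.count s[r] < (pvOcc s s[r] g (r + 1)).length := by
        have hsplit := pvOcc_split s s[r] g l (r + 1) hgl (by omega)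
        have hc2 := count_pvOcc s s[r] l (r + 1) (by omega) (by omega)
        rw [hsplit]
        simp only [List.length_append]
        omega
      have hble : l ≤ (pvOcc s s[r] g (r + 1)).getD
          ((pvOcc s s[r] g (r + 1)).length - cards.count s[r] - 1) 0 := by
        by_contra hlt
        push_neg at hlt
        have := (pvCount_le_iff s s[r] g l r (cards.count s[r]) hgl (by omega) hr hk).mpr hlt
        omega
      have hcntlen : (pvWin s l (r + 1)).count s[r] ≤ r + 1 - l := by
        have h1 : (pvWin s l (r + 1)).count s[r] ≤ (pvWin s l (r + 1)).length :=
          List.count_le_length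
        rw [pvWin_length s l (r + 1) (by omega) (by omega)] at h1
        exact h1
      have hlr' : l < r := by omega
      have hls : l < s.length := by omega
      have hsll : pvSL s (l : Int) = s[l] := pvSL_eq s l hls
      have hconsw : pvWin s l (r + 1) = s[l] :: pvWin s (l + 1) (r + 1) :=
        pvWin_cons s l (r + 1) (by omega) hls
      have hslc : 0 < cards.count s[l] := by
        refine hsub s[l] ?_
        rw [hconsw]; exact List.mem_cons_self
      have hinvN : pvCmInv cards (cm.modify s[l] 0 (· + 1)) s (l + 1) (r + 1) := by
        intro x
        rcases hinv x with ⟨hcx, hgx⟩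
        rw [hconsw, List.count_cons] at hgx
        constructor
        · rw [PySem.Dict.contains_modify]
          rcases eq_or_ne x s[l] with hx | hx
          · subst hx
            have hmem : s[l] ∈ cards := List.count_pos_iff.mp hslc
            simp [PySem.Dict.contains_counter, List.contains_eq_mem, hmem]
          · simp [hx, hcx]
        · rw [PySem.Dict.getD_modify]
          rcases eq_or_ne x s[l] with hx | hx
          · subst hx
            rw [if_pos rfl]
            simp at hgx
            push_cast [hgx]
            ring
          · rw [if_neg hx]
            simp [Ne.symm hx] at hgx
            push_cast at hgx ⊢
            omega
      have hsubN : pvSub s (l + 1) (r + 1) cards := by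
        intro x hx
        exact hsub x (by rw [hconsw]; exact List.mem_cons_of_mem _ hx)
      obtain ⟨l', cm', hA, ht, hgl', hl'r, hI, hS⟩ :=
        ih (l + 1) (cm.modify s[l] 0 (· + 1)) (by omega) (by omega) (by omega) hinvN hsubN
      refine ⟨l', cm', ?_, ?_, hgl', hl'r, hI, hS⟩
      · simp only [pvAInner]
        rw [if_pos ⟨by exact_mod_cast Nat.le_of_lt hlr', by rw [hsl, hcm]; omega⟩]
        rw [hsll]
        have hc1 : ((l : Int) + 1) = ((l + 1 : Nat) : Int) := by push_cast; ring
        rw [hc1]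
        exact hA
      · rw [ht]
        simp only [pvTarget]
        rw [hgd]
        rw [if_neg (by omega), if_neg (by omega)]
        omega

lemma pvGI_map (L : List Nat) (f : Nat) (h : f < L.length) :
    pvGI (L.map (fun i : Nat => (i : Int))) (((L.map (fun i : Nat => (i : Int))).length : Int) - (f : Int) - 1)
      = ((L.getD (L.length - f - 1) 0 : Nat) : Int) := by
  have hlt : L.length - f - 1 < L.length := by omega
  have hidx : ((L.map (fun i : Nat => (i : Int))).length : Int) - (f : Int) - 1
      = ((L.length - f - 1 : Nat) : Int) := by
    simp; omega
  have hmlt : L.length - f - 1 < (L.map (fun i : Nat => (i : Int))).length := by simpa using hlt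
  rw [hidx]
  unfold pvGI
  rw [PySem.List.pyGet?_natCast, List.getElem?_eq_getElem hmlt, List.getElem_map]
  simp [List.getD_eq_getElem?_getD, List.getElem?_eq_getElem hlt]

lemma pvFreq_eq (cards : List String) :
    cards.foldl (fun d card =>
      match d.get? card with
      | none => d.insert card 1
      | some _ => d.modify card 0 (· + 1)) (PySem.Dict.empty : PySem.Dict String Int)
    = PySem.Dict.counter cards := by
  rw [← PySem.Dict.foldl_insert_getD_add_one_eq_counter]
  congr 1
  funext d card
  cases h : d.get? card with
  | none => simp [PySem.Dict.getD_of_get?_eq_none d 0 h]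
  | some v => rfl

lemma pvOuter_eq (s cards : List String) (n : Int) (hn : n ≤ (s.length : Int)) :
    ∀ (fuel r l g : Nat) (ans : Int) (cm : PySem.Dict String Int)
      (occ : PySem.Dict String (List Int)),
      fuel = (n - (r : Int)).toNat → g ≤ l → l ≤ r →
      pvCmInv cards cm s l r → pvSub s l r cards →
      (∀ x : String, occ.getD x [] = (pvOcc s x g r).map (fun i : Nat => (i : Int))) →
      pvAOuter s (PySem.Dict.counter cards) n fuel (r : Int) (l : Int) ans cm
        = ((PySem.List.pyRange (r : Int) n 1).foldl
            (pvBStep s (PySem.Dict.counter cards)) (ans, (l : Int), occ)).1 := by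
  intro fuel
  induction fuel with
  | zero =>
    intro r l g ans cm occ hfuel _ _ _ _ _
    have hnr : n ≤ (r : Int) := by omega
    rw [PySem.List.pyRange_one_eq_nil hnr]
    simp [pvAOuter]
  | succ fuel ih =>
    intro r l g ans cm occ hfuel hgl hlr hinv hsub hocc
    have hrn : (r : Int) < n := by omega
    have hrs : r < s.length := by
      have : (r : Int) < (s.length : Int) := lt_of_lt_of_le hrn hn
      exact_mod_cast this
    have hsl : pvSL s (r : Int) = s[r] := pvSL_eq s r hrs
    rw [PySem.List.pyRange_one_cons hrn, List.foldl_cons]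
    have hcast1 : (r : Int) + 1 = ((r + 1 : Nat) : Int) := by push_cast; ring
    by_cases hmemc : 0 < cards.count s[r]
    · -- s[r] is a card
      have hcont : (PySem.Dict.counter cards).contains s[r] = true := by
        have hmem : s[r] ∈ cards := List.count_pos_iff.mp hmemc
        simp [PySem.Dict.contains_counter, List.contains_eq_mem, hmem]
      have hcmc : cm.contains s[r] = true := by rw [(hinv s[r]).1]; exact hcont
      have hsnocw : pvWin s l (r + 1) = pvWin s l r ++ [s[r]] := pvWin_snoc s l r hlr hrs
      have hinv1 : pvCmInv cards (cm.modify s[r] 0 (· - 1)) s l (r + 1) := by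
        intro x
        rcases hinv x with ⟨hcx, hgx⟩
        constructor
        · rw [PySem.Dict.contains_modify]
          rcases eq_or_ne x s[r] with hx | hx
          · subst hx; simp [hcont]
          · simp [hx, hcx]
        · rw [PySem.Dict.getD_modify, hsnocw, List.count_append]
          rcases eq_or_ne x s[r] with hx | hx
          · subst hx
            rw [if_pos rfl, hgx]
            have h1 : ([s[r]] : List String).count s[r] = 1 := by simp
            rw [h1]
            push_cast
            ring
          · rw [if_neg hx, hgx]
            simp [List.count_cons, Ne.symm hx]
      have hsub1 : pvSub s l (r + 1) cards := by
        intro x hx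
        rw [hsnocw] at hx
        rcases List.mem_append.mp hx with hx | hx
        · exact hsub x hx
        · simp at hx; subst hx; exact hmemc
      obtain ⟨l', cm', hA, ht, hgl', hl'r, hI, hS⟩ :=
        pvInner_eq s cards g r hrs hmemc (r + 1 - l) l (cm.modify s[r] 0 (· - 1))
          (by omega) hgl hlr hinv1 hsub1
      have hlst : occ.getD s[r] [] ++ [((r : Nat) : Int)]
          = (pvOcc s s[r] g (r + 1)).map (fun i : Nat => (i : Int)) := by
        rw [hocc s[r], pvOcc_snoc s s[r] g r (by omega) hrs, if_pos rfl]
        simp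
      -- B's step produces exactly (ans + (r - l' + 1), l', updated occ)
      have hstep : pvBStep s (PySem.Dict.counter cards) (ans, (l : Int), occ) (r : Int)
          = (ans + ((r : Int) - (l' : Int) + 1), (l' : Int),
             occ.insert s[r] (occ.getD s[r] [] ++ [((r : Nat) : Int)])) := by
        simp only [pvBStep, hsl]
        rw [if_neg (by simp [hcont])]
        have hlow : (if (PySem.Dict.counter cards).getD s[r] 0
              < ((occ.getD s[r] [] ++ [((r : Nat) : Int)]).length : Int) then
              max (l : Int) (pvGI (occ.getD s[r] [] ++ [((r : Nat) : Int)])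
                (((occ.getD s[r] [] ++ [((r : Nat) : Int)]).length : Int)
                  - (PySem.Dict.counter cards).getD s[r] 0 - 1) + 1)
            else (l : Int)) = (l' : Int) := by
          rw [ht]
          simp only [pvTarget]
          have hgd : s.getD r "" = s[r] := by
            simp [List.getD_eq_getElem?_getD, List.getElem?_eq_getElem hrs]
          rw [hgd, hlst, PySem.Dict.getD_counter]
          by_cases hL : (pvOcc s s[r] g (r + 1)).length ≤ cards.count s[r]
          · rw [if_neg (by simp; omega), if_pos hL]
          · push_neg at hL
            rw [if_pos (by simp; omega), if_neg (by omega)]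
            rw [pvGI_map _ _ hL]
            omega
        rw [hlow]
      rw [hstep]
      have hocc' : ∀ x : String,
          (occ.insert s[r] (occ.getD s[r] [] ++ [((r : Nat) : Int)])).getD x []
            = (pvOcc s x g (r + 1)).map (fun i : Nat => (i : Int)) := by
        intro x
        rw [PySem.Dict.getD_insert]
        rcases eq_or_ne x s[r] with hx | hx
        · subst hx; rw [if_pos rfl, hlst]
        · rw [if_neg hx, hocc x, pvOcc_snoc s x g r (by omega) hrs,
            if_neg (Ne.symm hx)]
          simp
      -- A's step
      simp only [pvAOuter]
      rw [if_neg (by rw [hsl, hcmc]; simp)]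
      rw [hsl]
      have htn : ((r : Int) + 1 - (l : Int)).toNat = r + 1 - l := by omega
      rw [htn, hA]
      simp only
      rw [hcast1]
      exact ih (r + 1) l' g (ans + ((r : Int) - (l' : Int) + 1)) cm'
        (occ.insert s[r] (occ.getD s[r] [] ++ [((r : Nat) : Int)]))
        (by omega) hgl' (by omega) hI hS hocc'
    · -- s[r] is not a card: both sides reset
      have hcont : (PySem.Dict.counter cards).contains s[r] = false := by
        have hmem : s[r] ∉ cards := fun hmem => hmemc (List.count_pos_iff.mpr hmem)
        simp [PySem.Dict.contains_counter, List.contains_eq_mem, hmem]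
      have hcmc : cm.contains s[r] = false := by rw [(hinv s[r]).1]; exact hcont
      simp only [pvAOuter, pvBStep, hsl]
      rw [if_pos hcmc, if_pos hcont]
      rw [hcast1]
      exact ih (r + 1) (r + 1) (r + 1) ans (PySem.Dict.counter cards) PySem.Dict.empty
        (by omega) le_rfl le_rfl
        (fun x => ⟨rfl, by simp [pvWin_nil, PySem.Dict.getD_counter]⟩)
        (fun x hx => by simp [pvWin_nil] at hx)
        (fun x => by simp [PySem.Dict.getD_empty, pvOcc_nil])

-- ===== VERDICT (by name: the statement is the Claim_ definition above) =====
theorem substrings_with_cards_spec : Claim_equal_substrings_with_cards := by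
  intro s cards n m _hdom hpre
  unfold Pre_substrings_with_cards at hpre
  unfold Spec_substrings_with_cards substrings_with_cards substrings_with_cards_alt
  rw [pvFreq_eq, PySem.Dict.foldl_insert_getD_add_one_eq_counter]
  have h0 := pvOuter_eq s cards n hpre n.toNat 0 0 0 0 (PySem.Dict.counter cards)
    PySem.Dict.empty (by omega) le_rfl le_rfl
    (fun x => ⟨rfl, by simp [pvWin_nil, PySem.Dict.getD_counter]⟩)
    (fun x hx => by simp [pvWin_nil] at hx)
    (fun x => by simp [PySem.Dict.getD_empty, pvOcc_nil])
  simpa using h0
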